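-- pv_equiv track=rewrite | github.com/Semih1997/CodingBat-Java-Problems-in-Python | Codingbat Java Array-2/QtenRun.py | tenRun
-- ===== SOURCE A (Python) =====
-- def tenRun(a):
--     out_list = []
--     divide_ten_control = False
--     ten_times = 0
--     for i in range(len(a)):
--         if a[i] % 10 == 0:
--             divide_ten_control = True
--             ten_times = a[i]
--         if divide_ten_control == False:
--             out_list.append(a[i])
--         else:
--             out_list.append(ten_times)
--     return out_list
-- ===== SOURCE B (Python) =====
-- def tenRun(a):
--     # span-fill: locate the multiples of ten once, copy the untouched prefix,
--     # then overwrite each span [i, next_mark) with a replicated block.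
--     marks = [(i, x) for i, x in enumerate(a) if x % 10 == 0]
--     if not marks:
--         return list(a)
--     out = list(a[:marks[0][0]])
--     nexts = [j for j, _ in marks[1:]] + [len(a)]
--     for (i, x), nxt in zip(marks, nexts):
--         out += [x] * (nxt - i)
--     return out
-- ===== Notes on version B (the rewrite author's own statement) =====
-- stated objective: alternative
-- what changed: Replaced A's fused per-element scan with mutable flag/value state by a span-fill algorithm: one pass collects the (index, value) positions of multiples of ten, then the result is the untouched prefix plus one replicated block [x]*(next_mark - i) per span.
import Mathlib
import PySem

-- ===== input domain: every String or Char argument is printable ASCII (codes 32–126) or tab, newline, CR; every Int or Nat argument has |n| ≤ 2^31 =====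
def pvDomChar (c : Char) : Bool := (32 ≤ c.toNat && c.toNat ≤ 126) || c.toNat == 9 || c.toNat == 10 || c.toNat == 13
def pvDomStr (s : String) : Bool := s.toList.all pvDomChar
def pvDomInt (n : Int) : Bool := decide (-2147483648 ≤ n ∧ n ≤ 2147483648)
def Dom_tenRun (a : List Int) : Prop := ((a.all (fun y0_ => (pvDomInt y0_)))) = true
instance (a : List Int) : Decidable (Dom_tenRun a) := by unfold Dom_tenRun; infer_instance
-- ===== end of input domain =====

-- B replaces A's per-element stateful scan by a span-fill algorithm: locate the
-- multiples of ten once, keep the untouched prefix, then emit a replicated block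
-- per span (alternative decomposition; same O(n) cost).

-- ===== PORT A =====
-- A's for-loop over indices, with its three mutable variables as the recursion's state.
def tenRunLoop (xs : List Int) (out : List Int) (flag : Bool) (ten : Int) : List Int :=
  match xs with
  | [] => out
  | x :: rest =>
    let flag' := if PySem.Int.mod x 10 = 0 then true else flag
    let ten'  := if PySem.Int.mod x 10 = 0 then x else ten
    if flag' = false then tenRunLoop rest (out ++ [x]) flag' ten'
    else tenRunLoop rest (out ++ [ten']) flag' ten'

def tenRun (a : List Int) : List Int := tenRunLoop a [] false 0

-- ===== PORT B =====
-- the for-loop 'out += [x] * (nxt - i)' over zip(marks, nexts)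
def bFill (pairs : List ((Int × Int) × Int)) (out : List Int) : List Int :=
  match pairs with
  | [] => out
  | ((i, x), nxt) :: rest => bFill rest (out ++ PySem.List.pyRepeat [x] (nxt - i))

def tenRun_alt (a : List Int) : List Int :=
  let marks := (PySem.List.enumerate a 0).filter (fun p => PySem.Int.mod p.2 10 == 0)
  match marks with
  | [] => a
  | (i0, x0) :: ms =>
    let nexts := ms.map (·.1) ++ [(a.length : Int)]
    bFill (((i0, x0) :: ms).zip nexts) (PySem.List.slice a none (some i0))

-- ===== PRECONDITION & SPEC =====
def Spec_tenRun (a : List Int) (out : List Int) : Prop := out = tenRun_alt a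
instance (a : List Int) (out : List Int) : Decidable (Spec_tenRun a out) := by unfold Spec_tenRun; infer_instance

-- ===== CLAIM (what is proved, stated in full; the proofs are below) =====
def Claim_equal_tenRun : Prop := ∀ (a : List Int), Dom_tenRun a → Spec_tenRun a (tenRun a)

-- ===== LEMMAS AND PROOFS =====
-- common spec: the carry recursion (last multiple of ten seen, or none)
def fcar : Option Int → List Int → List Int
  | _, [] => []
  | acc, x :: r =>
    if PySem.Int.mod x 10 = 0 then x :: fcar (some x) r
    else
      match acc with
      | none => x :: fcar none r
      | some t => t :: fcar (some t) r

-- A-side: invariant linking A's (flag, ten) state with the carry accumulator.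
def stateRel (flag : Bool) (ten : Int) (acc : Option Int) : Prop :=
  match acc with
  | none => flag = false
  | some v => flag = true ∧ ten = v

theorem tenRunLoop_eq (xs : List Int) : ∀ (out : List Int) (flag : Bool) (ten : Int)
    (acc : Option Int), stateRel flag ten acc →
    tenRunLoop xs out flag ten = out ++ fcar acc xs := by
  induction xs with
  | nil => intro out flag ten acc _; simp [tenRunLoop, fcar]
  | cons x rest ih =>
    intro out flag ten acc hrel
    by_cases h : PySem.Int.mod x 10 = 0
    · simp only [tenRunLoop, fcar, h, if_pos]
      rw [ih (out ++ [x]) true x (some x) (by simp [stateRel])]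
      simp
    · cases acc with
      | none =>
        have hf : flag = false := hrel
        subst hf
        simp only [tenRunLoop, fcar, h, if_false]
        rw [ih (out ++ [x]) false ten none (by simp [stateRel])]
        simp
      | some v =>
        obtain ⟨hf, ht⟩ := hrel
        subst hf; subst ht
        simp only [tenRunLoop, fcar, h, ite_false]
        rw [ih (out ++ [ten]) true ten (some ten) (by simp [stateRel])]
        simp

-- B-side: the marks comprehension, parametrised over the enumeration start
def marksFrom (k : Int) (a : List Int) : List (Int × Int) :=
  (PySem.List.enumerate a k).filter (fun p => PySem.Int.mod p.2 10 == 0)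

theorem marksFrom_cons (k : Int) (x : Int) (r : List Int) :
    marksFrom k (x :: r) =
      if PySem.Int.mod x 10 = 0 then (k, x) :: marksFrom (k + 1) r
      else marksFrom (k + 1) r := by
  simp [marksFrom, PySem.List.enumerate_cons, List.filter_cons]

theorem marksFrom_ge (a : List Int) : ∀ (k : Int) (p : Int × Int), p ∈ marksFrom k a → k ≤ p.1 := by
  induction a with
  | nil => intro k p hp; simp [marksFrom] at hp
  | cons x r ih =>
    intro k p hp
    rw [marksFrom_cons] at hp
    split_ifs at hp with h
    · rcases List.mem_cons.mp hp with h1 | h2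
      · subst h1; simp
      · have := ih (k + 1) p h2; omega
    · have := ih (k + 1) p hp; omega

-- span-fill, argument form (next boundary = next mark's index, or the end)
def fillLoop (marks : List (Int × Int)) (endI : Int) : List Int :=
  match marks with
  | [] => []
  | (i, x) :: rest =>
    let j := match rest with | [] => endI | (i2, _) :: _ => i2
    List.replicate (j - i).toNat x ++ fillLoop rest endI

theorem bFill_eq (marks : List (Int × Int)) : ∀ (endI : Int) (out : List Int),
    bFill (marks.zip (((marks.drop 1).map (·.1)) ++ [endI])) out = out ++ fillLoop marks endI := by
  induction marks with
  | nil => intro endI out; simp [bFill, fillLoop]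
  | cons m rest ih =>
    intro endI out
    obtain ⟨i, x⟩ := m
    cases rest with
    | nil =>
      simp [bFill, fillLoop, PySem.List.pyRepeat_singleton]
    | cons m2 rest2 =>
      obtain ⟨i2, y⟩ := m2
      simp only [List.drop_succ_cons, List.drop_zero, List.map_cons, List.cons_append,
        List.zip_cons_cons, bFill, fillLoop]
      have ih' := ih endI (out ++ PySem.List.pyRepeat [x] (i2 - i))
      simp only [List.drop_succ_cons, List.drop_zero] at ih'
      rw [ih']
      simp [fillLoop, PySem.List.pyRepeat_singleton]

-- the carry recursion in the 'a ten was seen' phase is a span fill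
theorem fcar_some (a : List Int) : ∀ (k t : Int), fcar (some t) a =
    (match marksFrom k a with
     | [] => List.replicate a.length t
     | (i, x) :: rest => List.replicate (i - k).toNat t ++ fillLoop ((i, x) :: rest) (k + a.length)) := by
  induction a with
  | nil => intro k t; simp [fcar, marksFrom, PySem.List.enumerate]
  | cons x r ih =>
    intro k t
    rw [marksFrom_cons]
    by_cases h : PySem.Int.mod x 10 = 0
    · simp only [fcar, h, if_pos]
      rw [ih (k + 1) x]
      cases hM : marksFrom (k + 1) r with
      | nil =>
        simp only [fillLoop, List.length_cons]
        have : (k + ((r.length : Int) + 1) - k).toNat = r.length + 1 := by omega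
        push_cast
        rw [this]
        simp [List.replicate_succ]
      | cons m2 rest2 =>
        obtain ⟨i2, y⟩ := m2
        have hge : (k + 1 : Int) ≤ i2 :=
          marksFrom_ge r (k + 1) (i2, y) (by rw [hM]; exact List.mem_cons_self)
        simp only [fillLoop, List.length_cons]
        have h1 : (i2 - (k + 1)).toNat + 1 = (i2 - k).toNat := by omega
        rw [show ((k : Int) + ((r.length + 1 : Nat) : Int)) = (k + 1) + (r.length : Int) by push_cast; ring]
        rw [← h1]
        simp [List.replicate_succ]
    · simp only [fcar, h, if_false]
      rw [ih (k + 1) t]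
      cases hM : marksFrom (k + 1) r with
      | nil =>
        simp [List.replicate_succ]
      | cons m2 rest2 =>
        obtain ⟨i2, y⟩ := m2
        have hge : (k + 1 : Int) ≤ i2 :=
          marksFrom_ge r (k + 1) (i2, y) (by rw [hM]; exact List.mem_cons_self)
        simp only [List.length_cons]
        have h1 : (i2 - (k + 1)).toNat + 1 = (i2 - k).toNat := by omega
        rw [show ((k : Int) + ((r.length + 1 : Nat) : Int)) = (k + 1) + (r.length : Int) by push_cast; ring]
        rw [← h1]
        simp [List.replicate_succ]

theorem fcar_none (a : List Int) : ∀ (k : Int), fcar none a =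
    (match marksFrom k a with
     | [] => a
     | (i, x) :: rest => a.take (i - k).toNat ++ fillLoop ((i, x) :: rest) (k + a.length)) := by
  induction a with
  | nil => intro k; simp [fcar, marksFrom, PySem.List.enumerate]
  | cons x r ih =>
    intro k
    rw [marksFrom_cons]
    by_cases h : PySem.Int.mod x 10 = 0
    · simp only [fcar, h, if_pos]
      rw [fcar_some r (k + 1) x]
      have hkk : ((k : Int) - k).toNat = 0 := by omega
      cases hM : marksFrom (k + 1) r with
      | nil =>
        simp only [fillLoop, List.length_cons, hkk, List.take_zero, List.nil_append]
        have : (k + (((r.length : Nat) + 1 : Nat) : Int) - k).toNat = r.length + 1 := by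
          push_cast; omega
        rw [this]
        simp [List.replicate_succ]
      | cons m2 rest2 =>
        obtain ⟨i2, y⟩ := m2
        have hge : (k + 1 : Int) ≤ i2 :=
          marksFrom_ge r (k + 1) (i2, y) (by rw [hM]; exact List.mem_cons_self)
        simp only [fillLoop, List.length_cons, hkk, List.take_zero, List.nil_append]
        have h1 : (i2 - (k + 1)).toNat + 1 = (i2 - k).toNat := by omega
        rw [show ((k : Int) + ((r.length + 1 : Nat) : Int)) = (k + 1) + (r.length : Int) by push_cast; ring]
        rw [← h1]
        simp [List.replicate_succ]
    · simp only [fcar, h, if_false]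
      rw [ih (k + 1)]
      cases hM : marksFrom (k + 1) r with
      | nil => simp
      | cons m2 rest2 =>
        obtain ⟨i2, y⟩ := m2
        have hge : (k + 1 : Int) ≤ i2 :=
          marksFrom_ge r (k + 1) (i2, y) (by rw [hM]; exact List.mem_cons_self)
        simp only [List.length_cons]
        have h1 : (i2 - (k + 1)).toNat + 1 = (i2 - k).toNat := by omega
        rw [show ((k : Int) + ((r.length + 1 : Nat) : Int)) = (k + 1) + (r.length : Int) by push_cast; ring]
        rw [← h1]
        simp [List.take_succ_cons]

theorem tenRun_alt_eq_fcar (a : List Int) : tenRun_alt a = fcar none a := by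
  unfold tenRun_alt
  rw [fcar_none a 0]
  have hmarks : (PySem.List.enumerate a 0).filter (fun p => PySem.Int.mod p.2 10 == 0)
      = marksFrom 0 a := rfl
  rw [hmarks]
  cases hM : marksFrom 0 a with
  | nil => simp
  | cons m ms =>
    obtain ⟨i0, x0⟩ := m
    have hge : (0 : Int) ≤ i0 :=
      marksFrom_ge a 0 (i0, x0) (by rw [hM]; exact List.mem_cons_self)
    simp only []
    have hb := bFill_eq ((i0, x0) :: ms) (a.length : Int) (PySem.List.slice a none (some i0))
    simp only [List.drop_succ_cons, List.drop_zero] at hb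
    rw [hb]
    rw [PySem.List.slice_to a hge]
    congr 1
    · congr 1; omega
    · congr 1; omega

-- ===== VERDICT (by name: the statement is the Claim_ definition above) =====
theorem tenRun_spec : Claim_equal_tenRun := by
  intro a _
  unfold Spec_tenRun tenRun
  rw [tenRunLoop_eq a [] false 0 none (by simp [stateRel]), tenRun_alt_eq_fcar]
  simp
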